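-- pv_equiv track=rewrite | github.com/LonghornSilicon/fp4-multiplier | triage/g4_dce_aware.py | dce
-- ===== SOURCE A (Python) =====
-- def dce(gates, output_names, primary_inputs):
--     """Mark which gates are reachable from outputs. Return list of reachable
--     gate names in original order."""
--     reachable = set(output_names)
--     # Walk backwards
--     name_to_gate = {g[0]: g for g in gates}
--     changed = True
--     while changed:
--         changed = False
--         for name in list(reachable):
--             if name in primary_inputs: continue
--             if name not in name_to_gate: continue
--             _, _, ins = name_to_gate[name]
--             for inp in ins:
--                 if inp not in reachable:
--                     reachable.add(inp)
--                     changed = True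
--     return [g[0] for g in gates if g[0] in reachable]
-- ===== SOURCE B (Python) =====
-- def dce(gates, output_names, primary_inputs):
--     """Mark which gates are reachable from outputs. Return list of reachable
--     gate names in original order."""
--     ins_of = {}
--     for g in gates:
--         ins_of[g[0]] = g[2]
--     pis = set(primary_inputs)
--     reachable = set()
--     stack = list(output_names)
--     while stack:
--         n = stack.pop()
--         if n in reachable:
--             continue
--         reachable.add(n)
--         if n in pis or n not in ins_of:
--             continue
--         stack.extend(ins_of[n])
--     return [g[0] for g in gates if g[0] in reachable]
-- ===== Notes on version B (the rewrite author's own statement) =====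
-- stated objective: faster
-- what changed: Replaces A's repeat-until-fixpoint rescans of the whole reachable set with a single stack worklist traversal from the outputs that expands each name at most once.
import Mathlib
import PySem

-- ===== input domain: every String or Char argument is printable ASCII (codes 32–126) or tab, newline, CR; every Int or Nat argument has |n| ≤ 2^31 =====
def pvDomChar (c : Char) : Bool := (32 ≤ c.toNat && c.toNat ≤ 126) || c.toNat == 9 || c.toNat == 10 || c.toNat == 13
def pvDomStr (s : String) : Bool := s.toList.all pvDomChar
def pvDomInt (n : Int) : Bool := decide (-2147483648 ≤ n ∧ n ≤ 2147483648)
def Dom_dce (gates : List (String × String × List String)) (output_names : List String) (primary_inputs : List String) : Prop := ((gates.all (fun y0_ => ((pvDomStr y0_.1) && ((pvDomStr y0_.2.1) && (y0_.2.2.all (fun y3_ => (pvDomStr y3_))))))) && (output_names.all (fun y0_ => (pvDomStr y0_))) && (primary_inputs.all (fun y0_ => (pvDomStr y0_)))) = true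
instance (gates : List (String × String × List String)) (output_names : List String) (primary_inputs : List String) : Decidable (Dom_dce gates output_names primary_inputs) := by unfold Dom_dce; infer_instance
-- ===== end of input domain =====

-- B replaces A's repeat-until-fixpoint rescans of the reachable set with a single
-- stack worklist from the outputs (each name expanded once): asymptotically faster, same result.


-- ===== PORT A =====
-- `for name in list(reachable)` iterates a snapshot of the set (Python hash order, not
-- modelled; the loop's final membership — all the result uses — is order-independent,
-- so the snapshot is taken in insertion order).  One pass of the while-body:
def dcePass (primary_inputs : List String)
    (ntg : PySem.Dict String (String × String × List String))
    (reach : PySem.Set String) : PySem.Set String × Bool :=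
  reach.foldl
    (fun st name =>
      if primary_inputs.contains name then st
      else
        match ntg.get? name with
        | none => st
        | some g =>
          g.2.2.foldl
            (fun st inp =>
              if PySem.Set.contains st.1 inp then st
              else (PySem.Set.add st.1 inp, true)) st)
    (reach, false)

-- `while changed:` — the fuel argument is only a totality guard; it is chosen large
-- enough that it is never exhausted (each continuing pass strictly grows the set).
def dceLoop (primary_inputs : List String)
    (ntg : PySem.Dict String (String × String × List String)) :
    Nat → PySem.Set String → PySem.Set String
  | 0, reach => reach
  | fuel + 1, reach =>
    let st := dcePass primary_inputs ntg reach
    if st.2 then dceLoop primary_inputs ntg fuel st.1 else st.1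

def dce (gates : List (String × String × List String)) (output_names : List String)
    (primary_inputs : List String) : List String :=
  let reachable := PySem.Set.ofList output_names
  let ntg := gates.foldl (fun d g => d.insert g.1 g) PySem.Dict.empty
  let fuel := output_names.length + (gates.map (fun g => g.2.2.length)).sum + 1
  let r := dceLoop primary_inputs ntg fuel reachable
  (gates.filter (fun g => PySem.Set.contains r g.1)).map (fun g => g.1)

-- ===== PORT B =====
-- `while stack:` with `stack.pop()` — fuel is again only a totality guard, never exhausted.
def dceAltLoop (pis : PySem.Set String) (insOf : PySem.Dict String (List String)) :
    Nat → PySem.Set String → List String → PySem.Set String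
  | 0, reach, _ => reach
  | fuel + 1, reach, stack =>
    match PySem.List.pop? stack with
    | none => reach
    | some (n, rest) =>
      if PySem.Set.contains reach n then dceAltLoop pis insOf fuel reach rest
      else
        let reach' := PySem.Set.add reach n
        if PySem.Set.contains pis n then dceAltLoop pis insOf fuel reach' rest
        else
          match insOf.get? n with
          | none => dceAltLoop pis insOf fuel reach' rest
          | some ins => dceAltLoop pis insOf fuel reach' (rest ++ ins)

def dce_alt (gates : List (String × String × List String)) (output_names : List String)
    (primary_inputs : List String) : List String :=
  let insOf := gates.foldl (fun d g => d.insert g.1 g.2.2) PySem.Dict.empty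
  let pis := PySem.Set.ofList primary_inputs
  let t := (gates.map (fun g => g.2.2.length)).sum
  let fuel := output_names.length + (output_names.length + t) * (t + 1) + 1
  let r := dceAltLoop pis insOf fuel PySem.Set.empty output_names
  (gates.filter (fun g => PySem.Set.contains r g.1)).map (fun g => g.1)

-- ===== PRECONDITION & SPEC =====
def Spec_dce (gates : List (String × String × List String)) (output_names : List String) (primary_inputs : List String) (out : List String) : Prop := out = dce_alt gates output_names primary_inputs
instance (gates : List (String × String × List String)) (output_names : List String) (primary_inputs : List String) (out : List String) : Decidable (Spec_dce gates output_names primary_inputs out) := by unfold Spec_dce; infer_instance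

-- ===== CLAIM (what is proved, stated in full; the proofs are below) =====
def Claim_equal_dce : Prop := ∀ (gates : List (String × String × List String)) (output_names : List String) (primary_inputs : List String), Dom_dce gates output_names primary_inputs → Spec_dce gates output_names primary_inputs (dce gates output_names primary_inputs)

-- ===== LEMMAS AND PROOFS =====

-- B's name → inputs dictionary (last gate with a given name wins, as in both Pythons).
def dceIns (gates : List (String × String × List String)) : PySem.Dict String (List String) :=
  gates.foldl (fun d g => d.insert g.1 g.2.2) PySem.Dict.empty

-- A's name → gate dictionary.
def dceNtg (gates : List (String × String × List String)) :
    PySem.Dict String (String × String × List String) :=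
  gates.foldl (fun d g => d.insert g.1 g) PySem.Dict.empty

-- All names that can ever become reachable, and bounds used by the fuel arguments.
def dceU (gates : List (String × String × List String)) (outs : List String) : List String :=
  outs ++ gates.flatMap (fun g => g.2.2)

def dceC (gates : List (String × String × List String)) (outs : List String) : Nat :=
  (PySem.Set.ofList (dceU gates outs)).length

def dceT (gates : List (String × String × List String)) : Nat :=
  (gates.map (fun g => g.2.2.length)).sum

-- The reachability closure both programs compute.
inductive DceReach (gates : List (String × String × List String))
    (outs pis : List String) : String → Prop
  | out (n : String) : n ∈ outs → DceReach gates outs pis n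
  | step (n x : String) (ins : List String) :
      DceReach gates outs pis n → n ∉ pis → (dceIns gates).get? n = some ins →
      x ∈ ins → DceReach gates outs pis x

lemma dceIns_get?_eq (gates : List (String × String × List String)) :
    ∀ (d1 : PySem.Dict String (String × String × List String))
      (d2 : PySem.Dict String (List String)),
      (∀ n, d2.get? n = (d1.get? n).map (fun g => g.2.2)) →
      ∀ n, (gates.foldl (fun d g => d.insert g.1 g.2.2) d2).get? n
          = ((gates.foldl (fun d g => d.insert g.1 g) d1).get? n).map (fun g => g.2.2) := by
  induction gates with
  | nil => intro d1 d2 h n; exact h n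
  | cons g gs ih =>
      intro d1 d2 h n
      simp only [List.foldl_cons]
      refine ih _ _ ?_ n
      intro m
      rw [PySem.Dict.get?_insert, PySem.Dict.get?_insert]
      split_ifs with hm
      · rfl
      · exact h m

lemma dceIns_eq_map (gates : List (String × String × List String)) (n : String) :
    (dceIns gates).get? n = ((dceNtg gates).get? n).map (fun g => g.2.2) := by
  exact dceIns_get?_eq gates PySem.Dict.empty PySem.Dict.empty
    (by intro m; simp [PySem.Dict.get?_empty]) n

lemma dce_get?_foldl_mem {ν : Type} (f : (String × String × List String) → ν) :
    ∀ (gates : List (String × String × List String))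
      (d : PySem.Dict String ν) (n : String) (v : ν),
      (gates.foldl (fun d g => d.insert g.1 (f g)) d).get? n = some v →
      (∃ g ∈ gates, v = f g) ∨ d.get? n = some v := by
  intro gates
  induction gates with
  | nil => intro d n v h; exact Or.inr h
  | cons g gs ih =>
      intro d n v h
      simp only [List.foldl_cons] at h
      rcases ih _ n v h with h1 | h1
      · rcases h1 with ⟨g', hg', hv⟩
        exact Or.inl ⟨g', List.mem_cons_of_mem _ hg', hv⟩
      · rw [PySem.Dict.get?_insert] at h1
        split_ifs at h1 with hn
        · exact Or.inl ⟨g, List.mem_cons_self .., by injection h1 with h2; exact h2.symm⟩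
        · exact Or.inr h1

lemma dceIns_sub (gates : List (String × String × List String)) (n : String)
    (ins : List String) (h : (dceIns gates).get? n = some ins) :
    (∃ g ∈ gates, ins = g.2.2) := by
  rcases dce_get?_foldl_mem (fun g => g.2.2) gates PySem.Dict.empty n ins h with h1 | h1
  · exact h1
  · simp [PySem.Dict.get?_empty] at h1

lemma dceIns_len_le (gates : List (String × String × List String)) (n : String)
    (ins : List String) (h : (dceIns gates).get? n = some ins) :
    ins.length ≤ dceT gates := by
  rcases dceIns_sub gates n ins h with ⟨g, hg, rfl⟩
  exact List.single_le_sum (by intro x _; exact Nat.zero_le x) _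
    (List.mem_map.mpr ⟨g, hg, rfl⟩)

lemma dceIns_mem_U (gates : List (String × String × List String)) (outs : List String)
    (n : String) (ins : List String) (h : (dceIns gates).get? n = some ins) :
    ∀ x ∈ ins, x ∈ dceU gates outs := by
  rcases dceIns_sub gates n ins h with ⟨g, hg, rfl⟩
  intro x hx
  exact List.mem_append_right _ (List.mem_flatMap.mpr ⟨g, hg, hx⟩)

-- minimality of the closure
lemma dceReach_subset (gates : List (String × String × List String)) (outs pis : List String)
    (S : List String)
    (hout : ∀ x ∈ outs, x ∈ S)
    (hcl : ∀ n ∈ S, n ∉ pis → ∀ ins, (dceIns gates).get? n = some ins → ∀ x ∈ ins, x ∈ S) :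
    ∀ x, DceReach gates outs pis x → x ∈ S := by
  intro x h
  induction h with
  | out n hn => exact hout n hn
  | step n x ins hr hp hg hx ih => exact hcl n ih hp ins hg x hx

lemma dce_closed_iff (gates : List (String × String × List String)) (outs pis : List String)
    (reach : List String)
    (houts : ∀ x ∈ outs, x ∈ reach)
    (hsound : ∀ x ∈ reach, DceReach gates outs pis x)
    (hcl : ∀ n ∈ reach, n ∉ pis → ∀ ins, (dceIns gates).get? n = some ins → ∀ x ∈ ins, x ∈ reach) :
    ∀ x, x ∈ reach ↔ DceReach gates outs pis x :=
  fun x => ⟨hsound x, dceReach_subset gates outs pis reach houts hcl x⟩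

-- ---- A-side analysis ----

lemma dceSet_update_of_subset (s : PySem.Set String) (xs : List String)
    (h : ∀ x ∈ xs, x ∈ s) : PySem.Set.update s xs = s := by
  have hnil : List.filter (fun y => !s.contains y) (PySem.Set.ofList xs) = [] := by
    apply List.filter_eq_nil_iff.mpr
    intro y hy
    simp [h y ((PySem.Set.mem_ofList xs y).mp hy)]
  rw [PySem.Set.update_eq_append_filter, hnil, List.append_nil]

lemma dceSet_len_le_update (s : PySem.Set String) (xs : List String) :
    s.length ≤ (PySem.Set.update s xs).length := by
  rw [PySem.Set.update_eq_append_filter]; simp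

lemma dceSet_len_lt_update (s : PySem.Set String) (xs : List String)
    (h : ¬ ∀ x ∈ xs, x ∈ s) : s.length < (PySem.Set.update s xs).length := by
  rcases Classical.not_forall.mp h with ⟨x, hx2⟩
  rcases Classical.not_imp.mp hx2 with ⟨hx, hxs⟩
  rw [PySem.Set.update_eq_append_filter, List.length_append]
  have : x ∈ List.filter (fun y => !s.contains y) (PySem.Set.ofList xs) := by
    apply List.mem_filter.mpr
    refine ⟨(PySem.Set.mem_ofList xs x).mpr hx, ?_⟩
    simp only [Bool.not_eq_true']
    exact (Bool.not_eq_true _).mp (fun hc => hxs ((PySem.Set.contains_iff s x).mp hc))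
  have hlen : 0 < (List.filter (fun y => !s.contains y) (PySem.Set.ofList xs)).length :=
    List.length_pos_of_mem this
  omega

lemma dceInner_eq (ins : List String) :
    ∀ (st : PySem.Set String × Bool),
      ins.foldl (fun st inp => if PySem.Set.contains st.1 inp then st
                   else (PySem.Set.add st.1 inp, true)) st
      = (PySem.Set.update st.1 ins, st.2 || !decide (∀ x ∈ ins, x ∈ st.1)) := by
  induction ins with
  | nil => intro st; simp [PySem.Set.update_nil]
  | cons a ins ih =>
      intro st
      simp only [List.foldl_cons]
      by_cases ha : a ∈ st.1
      · rw [if_pos ((PySem.Set.contains_iff st.1 a).mpr ha)]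
        rw [ih st]
        rw [PySem.Set.update_cons, PySem.Set.add_of_mem ha]
        congr 1
        simp [ha]
      · rw [if_neg (by simp [ha])]
        rw [ih (PySem.Set.add st.1 a, true)]
        rw [PySem.Set.update_cons]
        congr 1
        simp [ha]

-- the body of A's `for name in list(reachable)` pass, over an arbitrary name list/state
def dceOuter (primary_inputs : List String)
    (ntg : PySem.Dict String (String × String × List String))
    (names : List String) (st : PySem.Set String × Bool) : PySem.Set String × Bool :=
  names.foldl
    (fun st name =>
      if primary_inputs.contains name then st
      else
        match ntg.get? name with
        | none => st
        | some g =>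
          g.2.2.foldl
            (fun st inp =>
              if PySem.Set.contains st.1 inp then st
              else (PySem.Set.add st.1 inp, true)) st)
    st

lemma dcePass_eq (pis : List String) (ntg : PySem.Dict String (String × String × List String))
    (reach : PySem.Set String) :
    dcePass pis ntg reach = dceOuter pis ntg reach (reach, false) := rfl

-- one step of that pass, with the inner loop already summarised by dceInner_eq
def dceStep (pis : List String)
    (ntg : PySem.Dict String (String × String × List String))
    (st : PySem.Set String × Bool) (name : String) : PySem.Set String × Bool :=
  if pis.contains name then st
  else
    match ntg.get? name with
    | none => st
    | some g => (PySem.Set.update st.1 g.2.2, st.2 || !decide (∀ x ∈ g.2.2, x ∈ st.1))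

lemma dceOuter_nil (pis : List String)
    (ntg : PySem.Dict String (String × String × List String))
    (st : PySem.Set String × Bool) : dceOuter pis ntg [] st = st := rfl

lemma dceOuter_cons (pis : List String)
    (ntg : PySem.Dict String (String × String × List String))
    (n : String) (names : List String) (st : PySem.Set String × Bool) :
    dceOuter pis ntg (n :: names) st = dceOuter pis ntg names (dceStep pis ntg st n) := by
  simp only [dceOuter, List.foldl_cons, dceStep]
  congr 1
  split
  · rfl
  · split
    · rfl
    · rw [dceInner_eq]

lemma dceStep_cases (pis : List String)
    (ntg : PySem.Dict String (String × String × List String))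
    (st : PySem.Set String × Bool) (n : String) :
    (dceStep pis ntg st n = st ∧ (n ∈ pis ∨ ntg.get? n = none)) ∨
    (∃ g, n ∉ pis ∧ ntg.get? n = some g ∧
      dceStep pis ntg st n
        = (PySem.Set.update st.1 g.2.2, st.2 || !decide (∀ x ∈ g.2.2, x ∈ st.1))) := by
  by_cases hp : n ∈ pis
  · left
    constructor
    · simp [dceStep, hp]
    · exact Or.inl hp
  · rcases hg : ntg.get? n with _ | g
    · left
      constructor
      · simp [dceStep, hp, hg]
      · exact Or.inr rfl
    · right
      exact ⟨g, hp, rfl, by simp [dceStep, hp, hg]⟩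

lemma dceOuter_mem (pis : List String)
    (ntg : PySem.Dict String (String × String × List String)) :
    ∀ (names : List String) (st : PySem.Set String × Bool) (x : String),
      x ∈ (dceOuter pis ntg names st).1 ↔
        x ∈ st.1 ∨ ∃ n ∈ names, n ∉ pis ∧ ∃ g, ntg.get? n = some g ∧ x ∈ g.2.2 := by
  intro names
  induction names with
  | nil => intro st x; simp [dceOuter_nil]
  | cons n names ih =>
      intro st x
      rw [dceOuter_cons]
      rcases dceStep_cases pis ntg st n with ⟨h1, h2⟩ | ⟨g, hp, hg, h1⟩
      · rw [h1, ih st x]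
        constructor
        · rintro (hx | ⟨n', hn', hc⟩)
          · exact Or.inl hx
          · exact Or.inr ⟨n', List.mem_cons_of_mem _ hn', hc⟩
        · rintro (hx | ⟨n', hn', hp', g', hg', hx'⟩)
          · exact Or.inl hx
          · rcases List.mem_cons.mp hn' with rfl | hn''
            · rcases h2 with h2 | h2
              · exact absurd h2 hp'
              · rw [h2] at hg'; cases hg'
            · exact Or.inr ⟨n', hn'', hp', g', hg', hx'⟩
      · rw [h1, ih _ x]
        simp only []
        constructor
        · rintro (hx | ⟨n', hn', hc⟩)
          · rcases (PySem.Set.mem_update st.1 g.2.2 x).mp hx with hx | hx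
            · exact Or.inl hx
            · exact Or.inr ⟨n, List.mem_cons_self .., hp, g, hg, hx⟩
          · exact Or.inr ⟨n', List.mem_cons_of_mem _ hn', hc⟩
        · rintro (hx | ⟨n', hn', hp', g', hg', hx'⟩)
          · exact Or.inl ((PySem.Set.mem_update st.1 g.2.2 x).mpr (Or.inl hx))
          · rcases List.mem_cons.mp hn' with rfl | hn''
            · rw [hg] at hg'
              injection hg' with hgg
              subst hgg
              exact Or.inl ((PySem.Set.mem_update st.1 g.2.2 x).mpr (Or.inr hx'))
            · exact Or.inr ⟨n', hn'', hp', g', hg', hx'⟩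

lemma dceOuter_nodup (pis : List String)
    (ntg : PySem.Dict String (String × String × List String)) :
    ∀ (names : List String) (st : PySem.Set String × Bool),
      st.1.Nodup → (dceOuter pis ntg names st).1.Nodup := by
  intro names
  induction names with
  | nil => intro st h; exact h
  | cons n names ih =>
      intro st h
      rw [dceOuter_cons]
      rcases dceStep_cases pis ntg st n with ⟨h1, _⟩ | ⟨g, _, _, h1⟩
      · rw [h1]; exact ih st h
      · rw [h1]; exact ih _ (PySem.Set.nodup_update st.1 g.2.2 h)

lemma dceOuter_flag_false (pis : List String)
    (ntg : PySem.Dict String (String × String × List String)) :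
    ∀ (names : List String) (st : PySem.Set String × Bool),
      (dceOuter pis ntg names st).2 = false →
      (dceOuter pis ntg names st).1 = st.1 ∧ st.2 = false ∧
        ∀ n ∈ names, n ∉ pis → ∀ g, ntg.get? n = some g → ∀ x ∈ g.2.2, x ∈ st.1 := by
  intro names
  induction names with
  | nil =>
      intro st h
      refine ⟨rfl, ?_, by simp⟩
      rw [dceOuter_nil] at h
      exact h
  | cons n names ih =>
      intro st h
      rw [dceOuter_cons] at h ⊢
      rcases dceStep_cases pis ntg st n with ⟨h1, h2⟩ | ⟨g, hp, hg, h1⟩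
      · rw [h1] at h ⊢
        rcases ih st h with ⟨he, hf, hcl⟩
        refine ⟨he, hf, ?_⟩
        intro n' hn' hp' g' hg' x hx
        rcases List.mem_cons.mp hn' with rfl | hn''
        · rcases h2 with h2 | h2
          · exact absurd h2 hp'
          · rw [h2] at hg'; cases hg'
        · exact hcl n' hn'' hp' g' hg' x hx
      · rw [h1] at h ⊢
        rcases ih _ h with ⟨he, hf, hcl⟩
        simp only [Bool.or_eq_false_iff, Bool.not_eq_false', decide_eq_true_eq] at hf
        rcases hf with ⟨hf, hsub⟩
        have hupd : PySem.Set.update st.1 g.2.2 = st.1 := dceSet_update_of_subset st.1 g.2.2 hsub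
        have he' : (dceOuter pis ntg names
            (PySem.Set.update st.1 g.2.2, st.2 || !decide (∀ x ∈ g.2.2, x ∈ st.1))).1 = st.1 :=
          he.trans hupd
        have hcl' : ∀ n' ∈ names, n' ∉ pis → ∀ g', ntg.get? n' = some g' →
            ∀ x ∈ g'.2.2, x ∈ st.1 := by
          intro n' hn' hp' g' hg' x hx
          have := hcl n' hn' hp' g' hg' x hx
          rwa [hupd] at this
        refine ⟨he', hf, ?_⟩
        intro n' hn' hp' g' hg' x hx
        rcases List.mem_cons.mp hn' with rfl | hn''
        · rw [hg] at hg'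
          injection hg' with hgg
          subst hgg
          exact hsub x hx
        · exact hcl' n' hn'' hp' g' hg' x hx

lemma dceOuter_growth (pis : List String)
    (ntg : PySem.Dict String (String × String × List String)) :
    ∀ (names : List String) (st : PySem.Set String × Bool),
      st.1.length ≤ (dceOuter pis ntg names st).1.length ∧
      ((dceOuter pis ntg names st).2 = true →
        st.2 = true ∨ st.1.length < (dceOuter pis ntg names st).1.length) := by
  intro names
  induction names with
  | nil =>
      intro st
      exact ⟨le_refl _, fun h => Or.inl h⟩
  | cons n names ih =>
      intro st
      rw [dceOuter_cons]
      rcases dceStep_cases pis ntg st n with ⟨h1, _⟩ | ⟨g, hp, hg, h1⟩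
      · rw [h1]; exact ih st
      · rw [h1]
        rcases ih (PySem.Set.update st.1 g.2.2, st.2 || !decide (∀ x ∈ g.2.2, x ∈ st.1))
          with ⟨hle, hstrict⟩
        simp only [] at hle hstrict
        have hle0 : st.1.length ≤ (PySem.Set.update st.1 g.2.2).length :=
          dceSet_len_le_update st.1 g.2.2
        refine ⟨le_trans hle0 hle, ?_⟩
        intro hflag
        rcases hstrict hflag with hor | hlt
        · rcases Bool.or_eq_true_iff.mp hor with h2 | h2
          · exact Or.inl h2
          · simp only [Bool.not_eq_true', decide_eq_false_iff_not] at h2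
            have := dceSet_len_lt_update st.1 g.2.2 h2
            exact Or.inr (lt_of_lt_of_le this hle)
        · exact Or.inr (lt_of_le_of_lt hle0 hlt)

lemma dce_len_le_C (gates : List (String × String × List String)) (outs : List String)
    (reach : List String) (hnd : reach.Nodup) (hU : ∀ x ∈ reach, x ∈ dceU gates outs) :
    reach.length ≤ dceC gates outs := by
  apply List.Subperm.length_le
  apply List.subperm_of_subset hnd
  intro x hx
  exact (PySem.Set.mem_ofList _ x).mpr (hU x hx)

lemma dceC_le (gates : List (String × String × List String)) (outs : List String) :
    dceC gates outs ≤ outs.length + dceT gates := by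
  have h1 := PySem.Set.length_ofList_le (dceU gates outs)
  have h2 : (dceU gates outs).length = outs.length + dceT gates := by
    simp [dceU, dceT, List.length_flatMap]
  unfold dceC
  omega

lemma dceLoop_succ (pis : List String)
    (ntg : PySem.Dict String (String × String × List String))
    (fuel : Nat) (reach : PySem.Set String) :
    dceLoop pis ntg (fuel + 1) reach
      = if (dcePass pis ntg reach).2 then dceLoop pis ntg fuel (dcePass pis ntg reach).1
        else (dcePass pis ntg reach).1 := rfl

lemma dceLoop_char (gates : List (String × String × List String)) (outs pis : List String) :
    ∀ (fuel : Nat) (reach : PySem.Set String),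
      reach.Nodup →
      (∀ x ∈ reach, x ∈ dceU gates outs) →
      (∀ x ∈ outs, x ∈ reach) →
      (∀ x ∈ reach, DceReach gates outs pis x) →
      dceC gates outs < fuel + reach.length →
      ∀ x, x ∈ dceLoop pis (dceNtg gates) fuel reach ↔ DceReach gates outs pis x := by
  intro fuel
  induction fuel with
  | zero =>
      intro reach hnd hU houts hsound hlt x
      have hle := dce_len_le_C gates outs reach hnd hU
      exact absurd hlt (by omega)
  | succ fuel ih =>
      intro reach hnd hU houts hsound hlt x
      rw [dceLoop_succ, dcePass_eq]
      by_cases hch : (dceOuter pis (dceNtg gates) reach (reach, false)).2 = true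
      · rw [if_pos hch]
        have hmem := dceOuter_mem pis (dceNtg gates) reach (reach, false)
        apply ih
        · exact dceOuter_nodup pis (dceNtg gates) reach (reach, false) hnd
        · intro y hy
          rcases (hmem y).mp hy with hy' | ⟨n, _, _, g, hg, hy'⟩
          · exact hU y hy'
          · have hins : (dceIns gates).get? n = some g.2.2 := by
              rw [dceIns_eq_map, hg]; rfl
            exact dceIns_mem_U gates outs n g.2.2 hins y hy'
        · intro y hy
          exact (hmem y).mpr (Or.inl (houts y hy))
        · intro y hy
          rcases (hmem y).mp hy with hy' | ⟨n, hn, hp, g, hg, hy'⟩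
          · exact hsound y hy'
          · have hins : (dceIns gates).get? n = some g.2.2 := by
              rw [dceIns_eq_map, hg]; rfl
            exact DceReach.step n y g.2.2 (hsound n hn) hp hins hy'
        · rcases dceOuter_growth pis (dceNtg gates) reach (reach, false) with ⟨_, hstrict⟩
          rcases hstrict hch with hfalse | hlt2
          · cases hfalse
          · have hlt2' : reach.length
                < (dceOuter pis (dceNtg gates) reach (reach, false)).1.length := hlt2
            omega
      · rw [if_neg hch]
        have hf : (dceOuter pis (dceNtg gates) reach (reach, false)).2 = false := by
          cases h : (dceOuter pis (dceNtg gates) reach (reach, false)).2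
          · rfl
          · exact absurd h hch
        rcases dceOuter_flag_false pis (dceNtg gates) reach (reach, false) hf
          with ⟨he, _, hcl⟩
        rw [he]
        apply dce_closed_iff gates outs pis reach houts hsound
        intro n hn hp ins hins y hy
        rw [dceIns_eq_map] at hins
        rcases Option.map_eq_some_iff.mp hins with ⟨g, hg, rfl⟩
        exact hcl n hn hp g hg y hy

lemma dce_mem (gates : List (String × String × List String)) (outs pis : List String) :
    ∀ x, x ∈ dceLoop pis (dceNtg gates)
        (outs.length + (gates.map (fun g => g.2.2.length)).sum + 1)
        (PySem.Set.ofList outs) ↔ DceReach gates outs pis x := by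
  apply dceLoop_char
  · exact PySem.Set.nodup_ofList outs
  · intro x hx
    exact List.mem_append_left _ ((PySem.Set.mem_ofList outs x).mp hx)
  · intro x hx; exact (PySem.Set.mem_ofList outs x).mpr hx
  · intro x hx; exact DceReach.out x ((PySem.Set.mem_ofList outs x).mp hx)
  · have := dceC_le gates outs
    have : dceC gates outs ≤ outs.length + dceT gates := this
    simp only [dceT] at this
    omega

-- ---- B-side analysis ----

lemma dce_pop_concat (rest : List String) (n : String) :
    PySem.List.pop? (rest ++ [n]) = some (n, rest) := by
  simp [PySem.List.pop?, PySem.List.pyIdx?,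
    List.eraseIdx_append_of_length_le (le_refl rest.length)]

lemma dceAltLoop_nil (pis : PySem.Set String) (insOf : PySem.Dict String (List String))
    (fuel : Nat) (reach : PySem.Set String) :
    dceAltLoop pis insOf (fuel + 1) reach [] = reach := rfl

lemma dceAltLoop_concat (pis : PySem.Set String) (insOf : PySem.Dict String (List String))
    (fuel : Nat) (reach : PySem.Set String) (rest : List String) (n : String) :
    dceAltLoop pis insOf (fuel + 1) reach (rest ++ [n])
      = if PySem.Set.contains reach n then dceAltLoop pis insOf fuel reach rest
        else
          if PySem.Set.contains pis n then
            dceAltLoop pis insOf fuel (PySem.Set.add reach n) rest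
          else
            match insOf.get? n with
            | none => dceAltLoop pis insOf fuel (PySem.Set.add reach n) rest
            | some ins => dceAltLoop pis insOf fuel (PySem.Set.add reach n) (rest ++ ins) := by
  simp only [dceAltLoop, dce_pop_concat]

lemma dceAltLoop_char (gates : List (String × String × List String)) (outs pis : List String) :
    ∀ (fuel : Nat) (reach : PySem.Set String) (stack : List String),
      stack.length + (dceC gates outs - reach.length) * (dceT gates + 1) ≤ fuel →
      reach.Nodup →
      (∀ x ∈ reach, x ∈ dceU gates outs) →
      (∀ x ∈ stack, x ∈ dceU gates outs) →
      (∀ x ∈ reach, DceReach gates outs pis x) →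
      (∀ x ∈ stack, DceReach gates outs pis x) →
      (∀ x ∈ outs, x ∈ reach ∨ x ∈ stack) →
      (∀ n ∈ reach, n ∉ pis → ∀ ins, (dceIns gates).get? n = some ins →
        ∀ x ∈ ins, x ∈ reach ∨ x ∈ stack) →
      ∀ x, x ∈ dceAltLoop (PySem.Set.ofList pis) (dceIns gates) fuel reach stack ↔
        DceReach gates outs pis x := by
  intro fuel
  induction fuel with
  | zero =>
      intro reach stack hfuel hnd hU hstU hsound hstsound houts hpend x
      rcases List.eq_nil_or_concat stack with rfl | ⟨rest, n, rfl⟩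
      · refine dce_closed_iff gates outs pis reach ?_ hsound ?_ x
        · intro y hy
          rcases houts y hy with h | h
          · exact h
          · cases h
        · intro n hn hp ins hins y hy
          rcases hpend n hn hp ins hins y hy with h | h
          · exact h
          · cases h
      · exfalso
        simp only [List.concat_eq_append, List.length_append, List.length_singleton] at hfuel
        omega
  | succ fuel ih =>
      intro reach stack hfuel hnd hU hstU hsound hstsound houts hpend x
      rcases List.eq_nil_or_concat stack with rfl | ⟨rest, n, rfl⟩
      · rw [dceAltLoop_nil]
        refine dce_closed_iff gates outs pis reach ?_ hsound ?_ x
        · intro y hy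
          rcases houts y hy with h | h
          · exact h
          · cases h
        · intro n hn hp ins hins y hy
          rcases hpend n hn hp ins hins y hy with h | h
          · exact h
          · cases h
      · rw [List.concat_eq_append] at hfuel hstU hstsound houts hpend ⊢
        rw [dceAltLoop_concat]
        have hlen : (rest ++ [n]).length = rest.length + 1 := by simp
        have hmemn : n ∈ rest ++ [n] := by simp
        have hnU : n ∈ dceU gates outs := hstU n hmemn
        have hstU' : ∀ y ∈ rest, y ∈ dceU gates outs := by
          intro y hy; exact hstU y (by simp [hy])
        have hstsound' : ∀ y ∈ rest, DceReach gates outs pis y := by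
          intro y hy; exact hstsound y (by simp [hy])
        by_cases hn : n ∈ reach
        · rw [if_pos ((PySem.Set.contains_iff reach n).mpr hn)]
          refine ih reach rest ?_ hnd hU hstU' hsound hstsound' ?_ ?_ x
          · rw [hlen] at hfuel; omega
          · intro y hy
            rcases houts y hy with h | h
            · exact Or.inl h
            · rcases List.mem_append.mp h with h | h
              · exact Or.inr h
              · rw [List.mem_singleton.mp h]; exact Or.inl hn
          · intro n' hn' hp' ins hins y hy
            rcases hpend n' hn' hp' ins hins y hy with h | h
            · exact Or.inl h
            · rcases List.mem_append.mp h with h | h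
              · exact Or.inr h
              · rw [List.mem_singleton.mp h]; exact Or.inl hn
        · rw [if_neg (by simp [hn])]
          have hadd : PySem.Set.add reach n = reach ++ [n] := PySem.Set.add_of_not_mem hn
          have hnd' : (PySem.Set.add reach n).Nodup := PySem.Set.nodup_add reach n hnd
          have hU' : ∀ y ∈ PySem.Set.add reach n, y ∈ dceU gates outs := by
            intro y hy
            rcases (PySem.Set.mem_add reach n y).mp hy with h | rfl
            · exact hU y h
            · exact hnU
          have hsound' : ∀ y ∈ PySem.Set.add reach n, DceReach gates outs pis y := by
            intro y hy
            rcases (PySem.Set.mem_add reach n y).mp hy with h | rfl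
            · exact hsound y h
            · exact hstsound _ hmemn
          have hlen' : (PySem.Set.add reach n).length = reach.length + 1 := by
            rw [hadd]; simp
          have hrc : (PySem.Set.add reach n).length ≤ dceC gates outs :=
            dce_len_le_C gates outs _ hnd' hU'
          have hmul : (dceC gates outs - (reach.length + 1)) * (dceT gates + 1)
              ≤ (dceC gates outs - reach.length) * (dceT gates + 1) :=
            Nat.mul_le_mul_right _ (by omega)
          have hmemadd : ∀ y, y ∈ reach ∨ y = n → y ∈ PySem.Set.add reach n := by
            intro y hy; exact (PySem.Set.mem_add reach n y).mpr hy
          by_cases hpi : n ∈ pis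
          · rw [if_pos ((PySem.Set.contains_iff _ n).mpr
              ((PySem.Set.mem_ofList pis n).mpr hpi))]
            refine ih (PySem.Set.add reach n) rest ?_ hnd' hU' hstU' hsound' hstsound' ?_ ?_ x
            · rw [hlen] at hfuel; rw [hlen']; omega
            · intro y hy
              rcases houts y hy with h | h
              · exact Or.inl (hmemadd y (Or.inl h))
              · rcases List.mem_append.mp h with h | h
                · exact Or.inr h
                · exact Or.inl (hmemadd y (Or.inr (List.mem_singleton.mp h)))
            · intro n' hn' hp' ins hins y hy
              rcases (PySem.Set.mem_add reach n n').mp hn' with h | rfl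
              · rcases hpend n' h hp' ins hins y hy with h2 | h2
                · exact Or.inl (hmemadd y (Or.inl h2))
                · rcases List.mem_append.mp h2 with h2 | h2
                  · exact Or.inr h2
                  · exact Or.inl (hmemadd y (Or.inr (List.mem_singleton.mp h2)))
              · exact absurd hpi hp'
          · rw [if_neg (by
              simp only [Bool.not_eq_true]
              cases hc : PySem.Set.contains (PySem.Set.ofList pis) n
              · rfl
              · exact absurd ((PySem.Set.mem_ofList pis n).mp
                  ((PySem.Set.contains_iff _ n).mp hc)) hpi)]
            rcases hins : (dceIns gates).get? n with _ | ins
            · simp only []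
              refine ih (PySem.Set.add reach n) rest ?_ hnd' hU' hstU' hsound' hstsound' ?_ ?_ x
              · rw [hlen] at hfuel; rw [hlen']; omega
              · intro y hy
                rcases houts y hy with h | h
                · exact Or.inl (hmemadd y (Or.inl h))
                · rcases List.mem_append.mp h with h | h
                  · exact Or.inr h
                  · exact Or.inl (hmemadd y (Or.inr (List.mem_singleton.mp h)))
              · intro n' hn' hp' ins' hins' y hy
                rcases (PySem.Set.mem_add reach n n').mp hn' with h | rfl
                · rcases hpend n' h hp' ins' hins' y hy with h2 | h2
                  · exact Or.inl (hmemadd y (Or.inl h2))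
                  · rcases List.mem_append.mp h2 with h2 | h2
                    · exact Or.inr h2
                    · exact Or.inl (hmemadd y (Or.inr (List.mem_singleton.mp h2)))
                · rw [hins] at hins'; cases hins'
            · simp only []
              have hinsT : ins.length ≤ dceT gates := dceIns_len_le gates n ins hins
              have hinsU : ∀ y ∈ ins, y ∈ dceU gates outs := dceIns_mem_U gates outs n ins hins
              refine ih (PySem.Set.add reach n) (rest ++ ins) ?_ hnd' hU' ?_ hsound' ?_ ?_ ?_ x
              · rw [hlen] at hfuel
                rw [hlen', List.length_append]
                have hsplit : (dceC gates outs - reach.length) * (dceT gates + 1)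
                    = (dceC gates outs - (reach.length + 1)) * (dceT gates + 1)
                      + (dceT gates + 1) := by
                  have h1 : dceC gates outs - reach.length
                      = (dceC gates outs - (reach.length + 1)) + 1 := by
                    rw [hlen'] at hrc; omega
                  rw [h1, Nat.add_mul, one_mul]
                omega
              · intro y hy
                rcases List.mem_append.mp hy with h | h
                · exact hstU' y h
                · exact hinsU y h
              · intro y hy
                rcases List.mem_append.mp hy with h | h
                · exact hstsound' y h
                · exact DceReach.step n y ins (hstsound n hmemn) hpi hins h
              · intro y hy
                rcases houts y hy with h | h
                · exact Or.inl (hmemadd y (Or.inl h))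
                · rcases List.mem_append.mp h with h | h
                  · exact Or.inr (List.mem_append_left _ h)
                  · exact Or.inl (hmemadd y (Or.inr (List.mem_singleton.mp h)))
              · intro n' hn' hp' ins' hins' y hy
                rcases (PySem.Set.mem_add reach n n').mp hn' with h | rfl
                · rcases hpend n' h hp' ins' hins' y hy with h2 | h2
                  · exact Or.inl (hmemadd y (Or.inl h2))
                  · rcases List.mem_append.mp h2 with h2 | h2
                    · exact Or.inr (List.mem_append_left _ h2)
                    · exact Or.inl (hmemadd y (Or.inr (List.mem_singleton.mp h2)))
                · rw [hins] at hins'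
                  injection hins' with h2
                  subst h2
                  exact Or.inr (List.mem_append_right _ hy)

lemma dce_alt_mem (gates : List (String × String × List String)) (outs pis : List String) :
    ∀ x, x ∈ dceAltLoop (PySem.Set.ofList pis) (dceIns gates)
        (outs.length + (outs.length + (gates.map (fun g => g.2.2.length)).sum) *
          ((gates.map (fun g => g.2.2.length)).sum + 1) + 1)
        PySem.Set.empty outs ↔ DceReach gates outs pis x := by
  apply dceAltLoop_char
  · have h1 := dceC_le gates outs
    simp only [dceT] at h1 ⊢
    have : (PySem.Set.empty : PySem.Set String).length = 0 := rfl
    rw [this]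
    set t := (gates.map (fun g => g.2.2.length)).sum
    have h2 : dceC gates outs - 0 ≤ outs.length + t := by omega
    calc outs.length + (dceC gates outs - 0) * (t + 1)
        ≤ outs.length + (outs.length + t) * (t + 1) := by
          exact Nat.add_le_add_left (Nat.mul_le_mul_right _ h2) _
      _ ≤ outs.length + (outs.length + t) * (t + 1) + 1 := Nat.le_succ _
  · exact List.nodup_nil
  · intro x hx; simp [PySem.Set.empty] at hx
  · intro x hx; exact List.mem_append_left _ hx
  · intro x hx; simp [PySem.Set.empty] at hx
  · intro x hx; exact DceReach.out x hx
  · intro x hx; exact Or.inr hx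
  · intro n hn; simp [PySem.Set.empty] at hn

-- ---- putting it together ----

-- ===== VERDICT (by name: the statement is the Claim_ definition above) =====
theorem dce_spec : Claim_equal_dce := by
  intro gates outs pis _
  unfold Spec_dce dce dce_alt
  have hA := dce_mem gates outs pis
  have hB := dce_alt_mem gates outs pis
  refine congrArg (List.map _) (List.filter_congr ?_)
  intro g _
  have : (PySem.Set.contains (dceLoop pis (dceNtg gates)
      (outs.length + (gates.map (fun g => g.2.2.length)).sum + 1)
      (PySem.Set.ofList outs)) g.1 = true) ↔
      (PySem.Set.contains (dceAltLoop (PySem.Set.ofList pis) (dceIns gates)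
        (outs.length + (outs.length + (gates.map (fun g => g.2.2.length)).sum) *
          ((gates.map (fun g => g.2.2.length)).sum + 1) + 1)
        PySem.Set.empty outs) g.1 = true) := by
    rw [PySem.Set.contains_iff, PySem.Set.contains_iff, hA g.1, hB g.1]
  exact Bool.coe_iff_coe.mp this
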